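-- pv_equiv track=rewrite | github.com/cirosantilli/cirosantilli.github.io | euler/955.py | generate_sequence
-- ===== SOURCE A (Python) =====
-- from math import isqrt
-- from typing import Dict, List, Tuple
--
-- def is_triangular(t: int) -> bool:
--     d = 8 * t + 1
--     s = isqrt(d)
--     return s * s == d and (s - 1) % 2 == 0
--
-- def generate_sequence(limit_n: int) -> List[int]:
--     a = [3]
--     for n in range(limit_n):
--         an = a[n]
--         if is_triangular(an):
--             a.append(an + 1)
--         else:
--             a.append(2 * an - a[n - 1] + 1)
--     return a
-- ===== SOURCE B (Python) =====
-- from math import isqrt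
-- from typing import List
--
-- def is_triangular(t: int) -> bool:
--     d = 8 * t + 1
--     s = isqrt(d)
--     return s * s == d and (s - 1) % 2 == 0
--
-- def generate_sequence(limit_n: int) -> List[int]:
--     # Block decomposition: between triangular hits the increments are 1,2,3,...,
--     # so each block's terms are base + k*(k+1)//2 in closed form; a block ends
--     # (and a new base starts) when the emitted term is itself triangular.
--     # The start value 3 is triangular, so every block starts at a triangular base.
--     a = [3]
--     remaining = limit_n
--     while remaining > 0:
--         base = a[-1]
--         k = 1
--         while remaining > 0:
--             t = base + k * (k + 1) // 2
--             a.append(t)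
--             remaining -= 1
--             if is_triangular(t):
--                 break
--             k += 1
--     return a
-- ===== Notes on version B (the rewrite author's own statement) =====
-- stated objective: alternative
-- what changed: B replaces the term-by-term back-reference recurrence 2*a[n]-a[n-1]+1 by a two-level block decomposition: from each triangular base it emits base + k*(k+1)//2 in closed form until the emitted term is triangular, which starts a new block.
import Mathlib
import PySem

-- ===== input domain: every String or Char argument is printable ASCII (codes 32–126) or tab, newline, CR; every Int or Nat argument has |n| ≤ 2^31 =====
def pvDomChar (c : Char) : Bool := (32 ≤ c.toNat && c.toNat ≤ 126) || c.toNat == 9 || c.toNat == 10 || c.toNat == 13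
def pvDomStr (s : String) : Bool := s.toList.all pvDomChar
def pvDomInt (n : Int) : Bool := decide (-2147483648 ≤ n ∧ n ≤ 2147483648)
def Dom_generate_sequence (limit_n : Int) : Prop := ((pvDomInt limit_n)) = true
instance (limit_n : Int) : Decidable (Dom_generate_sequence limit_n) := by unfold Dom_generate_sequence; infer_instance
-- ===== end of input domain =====

-- B replaces the back-reference recurrence by a block decomposition (closed-form offsets
-- k*(k+1)//2 from each triangular base); return values are identical.

-- ===== PORT A =====
-- math.isqrt(d) = Nat.sqrt d.toNat, exact for d ≥ 0; here d = 8t+1 > 0 on every call.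
def is_triangular (t : Int) : Bool :=
  let d : Int := 8 * t + 1
  let s : Int := (Nat.sqrt d.toNat : Int)
  s * s == d && PySem.Int.mod (s - 1) 2 == 0

-- loop body of A: an = a[n]; triangular → append an+1, else append 2*an - a[n-1] + 1
def genStepA (a : List Int) (n : Int) : List Int :=
  let an := PySem.List.pyGetD a n 0        -- a[n]: index always in range (len a = n+1 at step n)
  if is_triangular an then a ++ [an + 1]
  else a ++ [2 * an - PySem.List.pyGetD a (n - 1) 0 + 1]

def generate_sequence (limit_n : Int) : List Int :=
  (PySem.List.pyRange 0 limit_n 1).foldl genStepA [3]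

-- ===== PORT B =====
def is_triangular_b (t : Int) : Bool :=
  let d : Int := 8 * t + 1
  let s : Int := (Nat.sqrt d.toNat : Int)
  s * s == d && PySem.Int.mod (s - 1) 2 == 0

-- the two nested while-loops of Source B, fused on the decreasing counter `remaining`:
-- a triangular emitted term starts a new block (base := t, k := 1), else k increments.
def loopB (remaining : Nat) (base k : Int) (acc : List Int) : List Int :=
  match remaining with
  | 0 => acc
  | r + 1 =>
    let t := base + PySem.Int.floordiv (k * (k + 1)) 2
    if is_triangular_b t then loopB r t 1 (acc ++ [t])
    else loopB r base (k + 1) (acc ++ [t])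

def generate_sequence_alt (limit_n : Int) : List Int :=
  loopB limit_n.toNat 3 1 [3]

-- ===== PRECONDITION & SPEC =====
def Spec_generate_sequence (limit_n : Int) (out : List Int) : Prop := out = generate_sequence_alt limit_n
instance (limit_n : Int) (out : List Int) : Decidable (Spec_generate_sequence limit_n out) := by unfold Spec_generate_sequence; infer_instance

-- ===== CLAIM =====
def Claim_equal_generate_sequence : Prop := ∀ (limit_n : Int), Dom_generate_sequence limit_n → Spec_generate_sequence limit_n (generate_sequence limit_n)

-- ===== LEMMAS AND PROOFS =====

-- triangular offsets: T(k+1) = T(k) + (k+1) for the Python floor division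
lemma tri_step (k : Int) :
    PySem.Int.floordiv ((k + 1) * (k + 1 + 1)) 2
      = PySem.Int.floordiv (k * (k + 1)) 2 + (k + 1) := by
  rw [PySem.Int.floordiv_eq_ediv_of_pos (by norm_num),
      PySem.Int.floordiv_eq_ediv_of_pos (by norm_num)]
  have h : (k + 1) * (k + 1 + 1) = k * (k + 1) + (k + 1) * 2 := by ring
  rw [h, Int.add_mul_ediv_right _ _ (by norm_num)]

lemma pyGetD_last_of_len {a : List Int} {j : Nat} (h : a.length = j + 1) :
    PySem.List.pyGetD a ((j : Int)) 0 = PySem.List.pyGetD a (-1) 0 := by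
  have hne : a ≠ [] := by intro hn; simp [hn] at h
  rw [PySem.List.pyGetD_natCast, PySem.List.pyGetD_neg_one a 0 hne]
  rw [List.getLast_eq_getElem]
  simp [List.getD, h]

-- Main invariant, by induction on the remaining step count r.
-- State: A is about to run steps j, j+1, …; acc has length j+1; B's state (base, k)
-- satisfies: the last element is base + T(k-1); at a block start (k = 1) it is the
-- triangular base itself, and mid-block (k ≥ 2) it is non-triangular and exceeds
-- the previous element by k-1.
lemma loop_agree (r : Nat) : ∀ (j : Nat) (acc : List Int) (base k : Int),
    acc.length = j + 1 →
    ((k = 1 ∧ PySem.List.pyGetD acc (-1) 0 = base ∧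
        is_triangular (PySem.List.pyGetD acc (-1) 0) = true) ∨
     (2 ≤ k ∧ is_triangular (PySem.List.pyGetD acc (-1) 0) = false ∧
        PySem.List.pyGetD acc (-1) 0 = base + PySem.Int.floordiv ((k - 1) * k) 2 ∧
        PySem.List.pyGetD acc ((j : Int) - 1) 0 = PySem.List.pyGetD acc (-1) 0 - (k - 1))) →
    (PySem.List.pyRange (j : Int) ((j : Int) + (r : Int)) 1).foldl genStepA acc
      = loopB r base k acc := by
  induction r with
  | zero =>
      intro j acc base k _ _
      simp only [Nat.cast_zero, add_zero]
      rw [PySem.List.pyRange_one_eq_nil le_rfl]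
      rfl
  | succ r ih =>
      intro j acc base k hlen hinv
      set last := PySem.List.pyGetD acc (-1) 0 with hlastdef
      have hcons : PySem.List.pyRange (j : Int) ((j : Int) + ((r + 1 : Nat) : Int)) 1
          = (j : Int) :: PySem.List.pyRange ((j : Int) + 1) ((j : Int) + ((r + 1 : Nat) : Int)) 1 := by
        exact PySem.List.pyRange_one_cons (by push_cast; omega)
      have hrange' : PySem.List.pyRange ((j : Int) + 1) ((j : Int) + ((r + 1 : Nat) : Int)) 1
          = PySem.List.pyRange ((j + 1 : Nat) : Int) (((j + 1 : Nat) : Int) + (r : Int)) 1 := by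
        push_cast; ring_nf
      have hget_j : PySem.List.pyGetD acc ((j : Int)) 0 = last := pyGetD_last_of_len hlen
      have hlen' : ∀ x : Int, (acc ++ [x]).length = (j + 1) + 1 := by
        intro x; simp [hlen]
      have hneg : ∀ x : Int, PySem.List.pyGetD (acc ++ [x]) (-1) 0 = x := fun x =>
        PySem.List.pyGetD_neg_one_append_singleton acc x 0
      have hprev' : ∀ x : Int, PySem.List.pyGetD (acc ++ [x]) (((j + 1 : Nat) : Int) - 1) 0 = last := by
        intro x
        have hc : (((j + 1 : Nat) : Int) - 1) = ((j : Nat) : Int) := by push_cast; ring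
        rw [hc, PySem.List.pyGetD_natCast]
        have hj : j < acc.length := by omega
        rw [← hget_j, PySem.List.pyGetD_natCast]
        simp [List.getD, List.getElem?_append_left hj]
      rcases hinv with ⟨hk1, hbase, htri⟩ | ⟨hk2, htri, hoff, hprev⟩
      · -- k = 1: A takes the triangular branch, appending last+1; B emits base + T(1) = last+1
        subst hk1
        have h2 : PySem.Int.floordiv (1 * (1 + 1)) 2 = 1 := by
          rw [PySem.Int.floordiv_eq_ediv_of_pos (by norm_num)]; decide
        have ht : base + PySem.Int.floordiv (1 * (1 + 1)) 2 = last + 1 := by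
          rw [hbase, h2]
        have hstepA : genStepA acc (j : Int) = acc ++ [last + 1] := by
          simp only [genStepA, hget_j, htri, if_pos]
        rw [hcons, List.foldl_cons, hstepA, hrange',
            show loopB (r + 1) base 1 acc
              = if is_triangular_b (base + PySem.Int.floordiv (1 * (1 + 1)) 2)
                then loopB r (base + PySem.Int.floordiv (1 * (1 + 1)) 2) 1
                       (acc ++ [base + PySem.Int.floordiv (1 * (1 + 1)) 2])
                else loopB r base 2
                       (acc ++ [base + PySem.Int.floordiv (1 * (1 + 1)) 2]) from rfl,
            ht]
        by_cases htri' : is_triangular (last + 1)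
        · rw [if_pos (by simpa [is_triangular_b, is_triangular] using htri')]
          exact ih (j + 1) (acc ++ [last + 1]) (last + 1) 1 (hlen' _)
            (Or.inl ⟨rfl, hneg _, by rw [hneg]; exact htri'⟩)
        · rw [if_neg (by simpa [is_triangular_b, is_triangular] using htri')]
          refine ih (j + 1) (acc ++ [last + 1]) base 2 (hlen' _) (Or.inr ⟨le_rfl, ?_, ?_, ?_⟩)
          · rw [hneg]; simpa using htri'
          · have h2 : PySem.Int.floordiv ((2 - 1) * 2) 2 = 1 := by
              rw [PySem.Int.floordiv_eq_ediv_of_pos (by norm_num)]; decide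
            rw [hneg, hbase, h2]
          · rw [hneg, hprev']; ring
      · -- 2 ≤ k: A's else branch appends 2*last - (last-(k-1)) + 1 = last + k; B emits base + T(k)
        have ht : base + PySem.Int.floordiv (k * (k + 1)) 2 = last + k := by
          have := tri_step (k - 1)
          rw [show (k - 1 + 1) = k by ring] at this
          rw [this, hoff]; ring
        have hstepA : genStepA acc (j : Int) = acc ++ [last + k] := by
          simp only [genStepA, hget_j, htri, if_neg, Bool.false_eq_true, not_false_iff, hprev]
          congr 2
          ring_nf
        rw [hcons, List.foldl_cons, hstepA, hrange',
            show loopB (r + 1) base k acc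
              = if is_triangular_b (base + PySem.Int.floordiv (k * (k + 1)) 2)
                then loopB r (base + PySem.Int.floordiv (k * (k + 1)) 2) 1
                       (acc ++ [base + PySem.Int.floordiv (k * (k + 1)) 2])
                else loopB r base (k + 1)
                       (acc ++ [base + PySem.Int.floordiv (k * (k + 1)) 2]) from rfl,
            ht]
        by_cases htri' : is_triangular (last + k)
        · rw [if_pos (by simpa [is_triangular_b, is_triangular] using htri')]
          exact ih (j + 1) (acc ++ [last + k]) (last + k) 1 (hlen' _)
            (Or.inl ⟨rfl, hneg _, by rw [hneg]; exact htri'⟩)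
        · rw [if_neg (by simpa [is_triangular_b, is_triangular] using htri')]
          refine ih (j + 1) (acc ++ [last + k]) base (k + 1) (hlen' _)
            (Or.inr ⟨by omega, ?_, ?_, ?_⟩)
          · rw [hneg]; simpa using htri'
          · rw [hneg, ← ht]
            congr 2
            ring_nf
          · rw [hneg, hprev']; ring

-- ===== VERDICT =====
theorem generate_sequence_spec : Claim_equal_generate_sequence := by
  intro limit_n _
  unfold Spec_generate_sequence generate_sequence generate_sequence_alt
  by_cases h : limit_n ≤ 0
  · rw [PySem.List.pyRange_one_eq_nil h, show limit_n.toNat = 0 by omega]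
    rfl
  · have hcast : ((limit_n.toNat : Nat) : Int) = limit_n := Int.toNat_of_nonneg (by omega)
    have htri3 : is_triangular (PySem.List.pyGetD [3] (-1) 0) = true := by
      have h3 : PySem.List.pyGetD [3] (-1) 0 = (3 : Int) := by decide
      rw [h3]
      norm_num [is_triangular, PySem.Int.mod_eq_emod_of_pos,
        show ((25 : Int)).toNat = 25 from rfl]
    have := loop_agree limit_n.toNat 0 [3] 3 1 (by decide)
      (Or.inl ⟨rfl, by decide, htri3⟩)
    rw [show ((0 : Nat) : Int) = 0 by rfl, zero_add, hcast] at this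
    exact this
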